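-- pv_equiv track=rewrite | github.com/RokoMijic/GlyphScoreAnalyzer | utils.py | get_block_name
-- ===== SOURCE A (Python) =====
-- def get_block_name(code_point: int) -> str:
--     """
--     Get the Unicode block name for a code point.
--     """
--     blocks = [
--         (0x0000, 0x007F, "Basic Latin"),
--         (0x0080, 0x00FF, "Latin-1 Supplement"),
--         (0x0100, 0x017F, "Latin Extended-A"),
--         (0x0180, 0x024F, "Latin Extended-B"),
--         (0x0250, 0x02AF, "IPA Extensions"),
--         (0x02B0, 0x02FF, "Spacing Modifier Letters"),
--         (0x0300, 0x036F, "Combining Diacritical Marks"),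
--         (0x0370, 0x03FF, "Greek and Coptic"),
--         (0x0400, 0x04FF, "Cyrillic"),
--         (0x0500, 0x052F, "Cyrillic Supplement"),
--     ]
--
--     for start, end, name in blocks:
--         if start <= code_point <= end:
--             return name
--     return "Unknown Block"
-- ===== SOURCE B (Python) =====
-- import bisect
--
-- _ENDS = [0x007F, 0x00FF, 0x017F, 0x024F, 0x02AF, 0x02FF, 0x036F, 0x03FF, 0x04FF, 0x052F]
-- _NAMES = ["Basic Latin", "Latin-1 Supplement", "Latin Extended-A", "Latin Extended-B",
--           "IPA Extensions", "Spacing Modifier Letters", "Combining Diacritical Marks",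
--           "Greek and Coptic", "Cyrillic", "Cyrillic Supplement"]
--
-- def get_block_name(code_point: int) -> str:
--     """Get the Unicode block name for a code point (binary search over end boundaries)."""
--     if code_point < 0 or code_point > 0x052F:
--         return "Unknown Block"
--     return _NAMES[bisect.bisect_left(_ENDS, code_point)]
-- ===== Notes on version B (the rewrite author's own statement) =====
-- stated objective: idiomatic
-- what changed: Replaces the sequential scan over (start,end,name) triples by a range check plus bisect_left binary search over a precomputed sorted list of block end-boundaries with a parallel name list.
import Mathlib
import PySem

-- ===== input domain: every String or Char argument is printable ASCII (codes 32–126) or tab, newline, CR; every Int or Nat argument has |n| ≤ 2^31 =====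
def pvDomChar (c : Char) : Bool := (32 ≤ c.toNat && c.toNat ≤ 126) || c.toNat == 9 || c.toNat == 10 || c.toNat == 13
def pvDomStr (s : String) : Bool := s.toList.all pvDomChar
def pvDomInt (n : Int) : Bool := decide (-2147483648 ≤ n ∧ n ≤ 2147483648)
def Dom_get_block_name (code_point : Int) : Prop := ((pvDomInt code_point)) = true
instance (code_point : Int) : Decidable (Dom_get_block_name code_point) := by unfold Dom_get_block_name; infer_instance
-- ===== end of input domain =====

-- B replaces A's sequential scan of (start,end,name) triples by a range check plus a
-- bisect_left binary search over a prebuilt sorted list of block end-boundaries (idiomatic).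


-- ===== PORT A =====
def pvBlocksA : List (Int × Int × String) :=
  [(0x0000, 0x007F, "Basic Latin"),
   (0x0080, 0x00FF, "Latin-1 Supplement"),
   (0x0100, 0x017F, "Latin Extended-A"),
   (0x0180, 0x024F, "Latin Extended-B"),
   (0x0250, 0x02AF, "IPA Extensions"),
   (0x02B0, 0x02FF, "Spacing Modifier Letters"),
   (0x0300, 0x036F, "Combining Diacritical Marks"),
   (0x0370, 0x03FF, "Greek and Coptic"),
   (0x0400, 0x04FF, "Cyrillic"),
   (0x0500, 0x052F, "Cyrillic Supplement")]

-- the 'for start, end, name in blocks' loop: first matching range returns its name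
def pvBlockLoop (code_point : Int) : List (Int × Int × String) → String
  | [] => "Unknown Block"
  | (s, e, name) :: rest =>
      if s ≤ code_point ∧ code_point ≤ e then name else pvBlockLoop code_point rest

def get_block_name (code_point : Int) : String :=
  pvBlockLoop code_point pvBlocksA

-- ===== PORT B =====
def pvEnds : List Int :=
  [0x007F, 0x00FF, 0x017F, 0x024F, 0x02AF, 0x02FF, 0x036F, 0x03FF, 0x04FF, 0x052F]

def pvNames : List String :=
  ["Basic Latin", "Latin-1 Supplement", "Latin Extended-A", "Latin Extended-B",
   "IPA Extensions", "Spacing Modifier Letters", "Combining Diacritical Marks",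
   "Greek and Coptic", "Cyrillic", "Cyrillic Supplement"]

-- bisect.bisect_left as a lo/hi binary-search loop (fuel = list length bounds the iterations)
def pvBisectLeft (a : List Int) (x : Int) : Nat → Nat → Nat → Nat
  | 0, lo, _ => lo
  | fuel + 1, lo, hi =>
      if lo < hi then
        let mid := (lo + hi) / 2
        if a.getD mid 0 < x then pvBisectLeft a x fuel (mid + 1) hi
        else pvBisectLeft a x fuel lo mid
      else lo

def get_block_name_alt (code_point : Int) : String :=
  if code_point < 0 ∨ code_point > 0x052F then "Unknown Block"
  else pvNames.getD (pvBisectLeft pvEnds code_point (pvEnds.length + 1) 0 pvEnds.length) "Unknown Block"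

-- ===== PRECONDITION & SPEC =====
def Spec_get_block_name (code_point : Int) (out : String) : Prop := out = get_block_name_alt code_point
instance (code_point : Int) (out : String) : Decidable (Spec_get_block_name code_point out) := by unfold Spec_get_block_name; infer_instance

-- ===== CLAIM (what is proved, stated in full; the proofs are below) =====
def Claim_equal_get_block_name : Prop := ∀ (code_point : Int), Dom_get_block_name code_point → Spec_get_block_name code_point (get_block_name code_point)

-- ===== LEMMAS AND PROOFS =====
set_option maxRecDepth 100000 in
set_option maxHeartbeats 1000000 in
theorem pv_small : ∀ k : Nat, k < 0x530 →
    get_block_name (Int.ofNat k) = get_block_name_alt (Int.ofNat k) := by decide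

-- ===== VERDICT (by name: the statement is the Claim_ definition above) =====
theorem get_block_name_spec : Claim_equal_get_block_name := by
  intro cp _
  unfold Spec_get_block_name
  by_cases h : cp < 0 ∨ cp > 0x052F
  · have hb : get_block_name_alt cp = "Unknown Block" := by
      simp only [get_block_name_alt, if_pos h]
    rw [hb]
    simp only [get_block_name, pvBlocksA, pvBlockLoop]
    split_ifs <;> first | rfl | omega
  · simp only [not_or, not_lt] at h
    obtain ⟨h0, h1⟩ := h
    have hk : Int.ofNat cp.toNat = cp := Int.toNat_of_nonneg h0
    have hlt : cp.toNat < 0x530 := by omega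
    rw [← hk]
    exact pv_small cp.toNat hlt
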